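-- pv_equiv track=rewrite | github.com/gunraj26/UBS_Team-Untitled | formula_engine.py | tokenize_for_multiplication
-- ===== SOURCE A (Python) =====
-- from typing import Dict, List
--
-- def tokenize_for_multiplication(expr: str) -> List[str]:
--     """Tokenize an expression for implicit multiplication detection.
--
--     The tokenizer recognizes numbers, names (including dotted names),
--     exponentiation operators, arithmetic operators, commas and
--     parentheses/brackets.  Whitespace is ignored.  The result is
--     intended solely for detecting places where multiplication
--     operators may have been omitted in the LaTeX source.
--
--     Parameters
--     ----------
--     expr : str
--         The Python expression to tokenize.
--
--     Returns
--     -------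
--     list[str]
--         A list of tokens in order of appearance.
--     """
--     tokens: List[str] = []
--     i = 0
--     n = len(expr)
--     while i < n:
--         ch = expr[i]
--         if ch.isspace():
--             i += 1
--             continue
--         if ch.isdigit() or (ch == '.' and i + 1 < n and expr[i + 1].isdigit()):
--             j = i + 1
--             while j < n and (expr[j].isdigit() or expr[j] == '.'):
--                 j += 1
--             tokens.append(expr[i:j])
--             i = j
--             continue
--         if ch.isalpha() or ch == '_' or ch == '.':
--             j = i + 1
--             while j < n and (expr[j].isalnum() or expr[j] in '._'):
--                 j += 1
--             tokens.append(expr[i:j])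
--             i = j
--             continue
--         # Handle exponentiation '**'
--         if ch == '*':
--             if i + 1 < n and expr[i + 1] == '*':
--                 tokens.append('**')
--                 i += 2
--                 continue
--             tokens.append('*')
--             i += 1
--             continue
--         if ch in '+-/%,' or ch == ':':
--             tokens.append(ch)
--             i += 1
--             continue
--         if ch in '()[]':
--             tokens.append(ch)
--             i += 1
--             continue
--         # Any other character is treated as a single token
--         tokens.append(ch)
--         i += 1
--     return tokens
-- ===== SOURCE B (Python) =====
-- from typing import List
--
-- def tokenize_for_multiplication(expr: str) -> List[str]:
--     """Single-pass state-machine tokenizer: one character at a time, no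
--     index arithmetic, no inner scanning loops, no slicing."""
--     tokens: List[str] = []
--     mode = ''          # '', 'num', 'name', 'dot', 'star'
--     cur = ''
--     for ch in expr:
--         while True:
--             if mode == 'num':
--                 if ch.isdigit() or ch == '.':
--                     cur += ch
--                     break
--                 tokens.append(cur)
--                 cur = ''
--                 mode = ''
--                 continue
--             if mode == 'name':
--                 if ch.isalnum() or ch in '._':
--                     cur += ch
--                     break
--                 tokens.append(cur)
--                 cur = ''
--                 mode = ''
--                 continue
--             if mode == 'dot':
--                 if ch.isdigit():
--                     mode = 'num'
--                     cur = '.' + ch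
--                     break
--                 if ch.isalnum() or ch in '._':
--                     mode = 'name'
--                     cur = '.' + ch
--                     break
--                 tokens.append('.')
--                 mode = ''
--                 continue
--             if mode == 'star':
--                 if ch == '*':
--                     tokens.append('**')
--                     mode = ''
--                     break
--                 tokens.append('*')
--                 mode = ''
--                 continue
--             # mode == '': start a new token with ch
--             if ch.isspace():
--                 break
--             if ch.isdigit():
--                 mode = 'num'
--                 cur = ch
--                 break
--             if ch == '.':
--                 mode = 'dot'
--                 break
--             if ch.isalpha() or ch == '_':
--                 mode = 'name'
--                 cur = ch
--                 break
--             if ch == '*':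
--                 mode = 'star'
--                 break
--             tokens.append(ch)
--             break
--     if mode in ('num', 'name'):
--         tokens.append(cur)
--     elif mode == 'dot':
--         tokens.append('.')
--     elif mode == 'star':
--         tokens.append('*')
--     return tokens
-- ===== Notes on version B (the rewrite author's own statement) =====
-- stated objective: alternative
-- what changed: Replaced the index-based scanner with inner lookahead loops and slicing by a single-pass character-at-a-time state machine (modes num/name/dot/star) that builds tokens in an accumulator with no index arithmetic or slices.
import Mathlib
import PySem

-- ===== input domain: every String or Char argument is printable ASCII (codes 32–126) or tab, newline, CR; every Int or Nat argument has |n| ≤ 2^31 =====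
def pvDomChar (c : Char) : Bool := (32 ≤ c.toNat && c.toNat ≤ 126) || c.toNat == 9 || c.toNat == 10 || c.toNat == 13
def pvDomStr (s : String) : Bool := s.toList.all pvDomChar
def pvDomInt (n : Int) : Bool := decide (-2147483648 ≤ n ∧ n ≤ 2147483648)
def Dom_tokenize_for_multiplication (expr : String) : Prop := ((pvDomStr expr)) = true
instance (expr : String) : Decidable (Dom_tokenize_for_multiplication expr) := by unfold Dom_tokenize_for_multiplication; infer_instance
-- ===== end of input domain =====

-- B replaces A's index-based scanner (inner lookahead loops + slicing) by a one-pass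
-- character state machine; same O(n) cost, different structure (objective: alternative).

-- ===== PORT A =====
-- A's inner number loop: j scans digits/dots; returns (scanned chars, rest)
def aNum : List Char → (List Char × List Char)
  | [] => ([], [])
  | c :: cs =>
    if PySem.Chars.isdigit c || c == '.' then
      let p := aNum cs; (c :: p.1, p.2)
    else ([], c :: cs)

-- A's inner name loop: j scans alnum/'.'/'_'
def aName : List Char → (List Char × List Char)
  | [] => ([], [])
  | c :: cs =>
    if PySem.Chars.isalnum c || c == '.' || c == '_' then
      let p := aName cs; (c :: p.1, p.2)
    else ([], c :: cs)

theorem aNum_len (cs : List Char) : (aNum cs).2.length ≤ cs.length := by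
  induction cs with
  | nil => simp [aNum]
  | cons c cs ih => simp only [aNum]; split <;> simp <;> omega

theorem aName_len (cs : List Char) : (aName cs).2.length ≤ cs.length := by
  induction cs with
  | nil => simp [aName]
  | cons c cs ih => simp only [aName]; split <;> simp <;> omega

-- lookahead expr[i+1].isdigit() / expr[i+1] == '*' (False when i+1 = n)
def nextIsDigit : List Char → Bool
  | d :: _ => PySem.Chars.isdigit d
  | [] => false

def nextIsStar : List Char → Bool
  | d :: _ => d == '*'
  | [] => false

-- A's outer while loop: position i becomes the remaining suffix
def aGo : List Char → List String
  | [] => []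
  | c :: cs =>
    if PySem.Chars.isspace c then aGo cs
    else if PySem.Chars.isdigit c || (c == '.' && nextIsDigit cs) then
      let p := aNum cs
      String.ofList (c :: p.1) :: aGo p.2
    else if PySem.Chars.isalpha c || c == '_' || c == '.' then
      let p := aName cs
      String.ofList (c :: p.1) :: aGo p.2
    else if c == '*' then
      if nextIsStar cs then "**" :: aGo cs.tail
      else "*" :: aGo cs
    else if c == '+' || c == '-' || c == '/' || c == '%' || c == ',' || c == ':' then
      String.ofList [c] :: aGo cs
    else if c == '(' || c == ')' || c == '[' || c == ']' then
      String.ofList [c] :: aGo cs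
    else
      String.ofList [c] :: aGo cs
termination_by cs => cs.length
decreasing_by
  · simp only [List.length_cons]; omega
  · have := aNum_len cs; simp only [List.length_cons]; omega
  · have := aName_len cs; simp only [List.length_cons]; omega
  · simp only [List.length_cons, List.length_tail]; omega
  all_goals simp only [List.length_cons]; omega

def tokenize_for_multiplication (expr : String) : List String := aGo expr.toList

-- ===== PORT B =====
-- state of the machine: mode '' / 'num' / 'name' / 'dot' / 'star'; cur kept reversed
inductive BMode where
  | idle : BMode
  | num : List Char → BMode
  | name : List Char → BMode
  | dot : BMode
  | star : BMode
deriving DecidableEq, Repr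

-- final flush after the loop
def bFlush : BMode → List String
  | .idle => []
  | .num acc => [String.ofList acc.reverse]
  | .name acc => [String.ofList acc.reverse]
  | .dot => ["."]
  | .star => ["*"]

mutual
-- the for-loop body in mode '': start a new token with c
def bStart (c : Char) (cs : List Char) : List String :=
  if PySem.Chars.isspace c then bGo cs .idle
  else if PySem.Chars.isdigit c then bGo cs (.num [c])
  else if c == '.' then bGo cs .dot
  else if PySem.Chars.isalpha c || c == '_' then bGo cs (.name [c])
  else if c == '*' then bGo cs .star
  else String.ofList [c] :: bGo cs .idle
termination_by 2 * cs.length + 1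
decreasing_by all_goals first | (simp; omega) | simp

-- the for-loop: one character per step; a flush re-dispatches the same character
def bGo : List Char → BMode → List String
  | [], m => bFlush m
  | c :: cs, m =>
    match m with
    | .idle => bStart c cs
    | .num acc =>
      if PySem.Chars.isdigit c || c == '.' then bGo cs (.num (c :: acc))
      else String.ofList acc.reverse :: bStart c cs
    | .name acc =>
      if PySem.Chars.isalnum c || c == '.' || c == '_' then bGo cs (.name (c :: acc))
      else String.ofList acc.reverse :: bStart c cs
    | .dot =>
      if PySem.Chars.isdigit c then bGo cs (.num [c, '.'])
      else if PySem.Chars.isalnum c || c == '.' || c == '_' then bGo cs (.name [c, '.'])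
      else "." :: bStart c cs
    | .star =>
      if c == '*' then "**" :: bGo cs .idle
      else "*" :: bStart c cs
termination_by cs _ => 2 * cs.length
decreasing_by all_goals first | (simp; omega) | simp
end

def tokenize_for_multiplication_alt (expr : String) : List String := bGo expr.toList .idle

-- ===== PRECONDITION & SPEC =====
def Spec_tokenize_for_multiplication (expr : String) (out : List String) : Prop := out = tokenize_for_multiplication_alt expr
instance (expr : String) (out : List String) : Decidable (Spec_tokenize_for_multiplication expr out) := by unfold Spec_tokenize_for_multiplication; infer_instance

-- ===== CLAIM (what is proved, stated in full; the proofs are below) =====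
def Claim_equal_tokenize_for_multiplication : Prop := ∀ (expr : String), Dom_tokenize_for_multiplication expr → Spec_tokenize_for_multiplication expr (tokenize_for_multiplication expr)

-- ===== LEMMAS AND PROOFS =====

-- B's num mode consumes exactly what A's inner number loop consumes
theorem bGo_num (cs : List Char) (acc : List Char) :
    bGo cs (.num acc) =
      String.ofList (acc.reverse ++ (aNum cs).1) :: bGo (aNum cs).2 .idle := by
  induction cs generalizing acc with
  | nil => simp [bGo, bFlush, aNum]
  | cons c cs ih =>
    by_cases h : (PySem.Chars.isdigit c || c == '.') = true
    · simp only [bGo, aNum, if_pos h, ih]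
      simp
    · simp only [bGo, aNum, if_neg h]
      simp

-- B's name mode consumes exactly what A's inner name loop consumes
theorem bGo_name (cs : List Char) (acc : List Char) :
    bGo cs (.name acc) =
      String.ofList (acc.reverse ++ (aName cs).1) :: bGo (aName cs).2 .idle := by
  induction cs generalizing acc with
  | nil => simp [bGo, bFlush, aName]
  | cons c cs ih =>
    by_cases h : (PySem.Chars.isalnum c || c == '.' || c == '_') = true
    · simp only [bGo, aName, if_pos h, ih]
      simp
    · simp only [bGo, aName, if_neg h]
      simp

theorem main_equiv : ∀ (n : Nat) (cs : List Char), cs.length ≤ n → aGo cs = bGo cs .idle := by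
  intro n
  induction n with
  | zero =>
    intro cs h
    have : cs = [] := by cases cs <;> simp_all
    simp [this, aGo, bGo, bFlush]
  | succ n ih =>
    intro cs hlen
    match cs with
    | [] => simp [aGo, bGo, bFlush]
    | c :: cs =>
      simp only [List.length_cons] at hlen
      simp only [aGo, bGo, bStart]
      by_cases hsp : PySem.Chars.isspace c = true
      · simp only [hsp, if_true]
        exact ih cs (by omega)
      simp only [hsp, Bool.false_eq_true, if_false]
      by_cases hd : PySem.Chars.isdigit c = true
      · -- digit start: number token
        simp only [hd, Bool.true_or, if_true]
        rw [bGo_num]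
        have h2 := aNum_len cs
        simp [ih (aNum cs).2 (by omega)]
      simp only [hd, Bool.false_or]
      by_cases hdot : c = '.'
      · subst hdot
        simp only [beq_self_eq_true, Bool.true_and, Bool.or_true, if_true]
        match cs with
        | [] =>
          simp [nextIsDigit, aName, aGo, bGo, bFlush]
        | d :: cs' =>
          simp only [List.length_cons] at hlen
          by_cases hdd : PySem.Chars.isdigit d = true
          · -- '.5' : number token in both
            simp only [nextIsDigit, hdd, if_true, bGo]
            rw [bGo_num]
            simp only [aNum, hdd, Bool.true_or, if_true]
            have h2 := aNum_len cs'
            simp [ih (aNum cs').2 (by omega)]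
          · -- '.x' : name token / bare '.' in both
            simp only [nextIsDigit, hdd, Bool.false_eq_true, if_false, bGo]
            by_cases hnc : (PySem.Chars.isalnum d || d == '.' || d == '_') = true
            · rw [if_pos hnc, bGo_name]
              simp only [aName, if_pos hnc]
              have h2 := aName_len cs'
              simp [ih (aName cs').2 (by omega)]
            · rw [if_neg hnc]
              simp only [aName, if_neg hnc]
              rw [show bStart d cs' = bGo (d :: cs') .idle by simp [bGo]]
              simp [ih (d :: cs') (by simp only [List.length_cons]; omega)]
      simp only [show (c == '.') = false by simpa using hdot, Bool.false_and, Bool.or_false,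
                 Bool.false_eq_true, if_false]
      by_cases hal : (PySem.Chars.isalpha c || c == '_') = true
      · -- name start
        simp only [hal, if_true]
        rw [bGo_name]
        have h2 := aName_len cs
        simp [ih (aName cs).2 (by omega)]
      simp only [hal, Bool.false_eq_true, if_false]
      by_cases hst : c = '*'
      · subst hst
        simp only [beq_self_eq_true, if_true]
        match cs with
        | [] => simp [nextIsStar, aGo, bGo, bFlush]
        | d :: cs' =>
          simp only [List.length_cons] at hlen
          by_cases hdd : d = '*'
          · subst hdd
            simp only [nextIsStar, beq_self_eq_true, if_true, List.tail_cons, bGo]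
            simp [ih cs' (by omega)]
          · simp only [nextIsStar, show (d == '*') = false by simpa using hdd,
                       Bool.false_eq_true, if_false, bGo]
            rw [show bStart d cs' = bGo (d :: cs') .idle by simp [bGo]]
            simp [ih (d :: cs') (by simp only [List.length_cons]; omega)]
      · -- every other character: single-char token in both
        simp only [show (c == '*') = false by simpa using hst, Bool.false_eq_true, if_false]
        have hrec := ih cs (by omega)
        split_ifs <;> simp [hrec]

-- ===== VERDICT (by name: the statement is the Claim_ definition above) =====
theorem tokenize_for_multiplication_spec : Claim_equal_tokenize_for_multiplication := by
  intro expr _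
  unfold Spec_tokenize_for_multiplication tokenize_for_multiplication tokenize_for_multiplication_alt
  exact main_equiv expr.toList.length expr.toList le_rfl
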